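-- pv_equiv track=rewrite | github.com/Open-NTNP/GX-builder | libs/gui.py | generate_auto_id
-- ===== SOURCE A (Python) =====
-- def generate_auto_id(prefix, existing_list):
--     used = set()
--     for e in existing_list:
--         if isinstance(e, dict) and 'id' in e:
--             used.add(str(e['id']))
--     i = 0
--     base = prefix.replace(" ", "_")
--     while True:
--         candidate = f"{base}_{i}"
--         if candidate not in used:
--             return candidate
--         i += 1
-- ===== SOURCE B (Python) =====
-- def generate_auto_id(prefix, existing_list):
--     base = prefix.replace(" ", "_")
--     tag = base + "_"
--     taken = set()
--     for e in existing_list: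
--         if isinstance(e, dict) and 'id' in e:
--             s = str(e['id'])
--             if s.startswith(tag):
--                 rest = s[len(tag):]
--                 if rest.isdigit() and (rest == "0" or rest[0] != "0"):
--                     n = 0
--                     for c in rest:
--                         n = 10 * n + (ord(c) - 48)
--                     taken.add(n)
--     i = 0
--     for n in sorted(taken):
--         if n == i:
--             i += 1
--     return f"{base}_{i}"
-- ===== Notes on version B (the rewrite author's own statement) =====
-- stated objective: alternative
-- what changed: Instead of probing candidate strings base_0, base_1, ... against the set of all ids (O(answer) probes), B parses each id's canonical numeric suffix once into an integer set and returns base_<mex> computed by a single scan over the sorted indices.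
import Mathlib
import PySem

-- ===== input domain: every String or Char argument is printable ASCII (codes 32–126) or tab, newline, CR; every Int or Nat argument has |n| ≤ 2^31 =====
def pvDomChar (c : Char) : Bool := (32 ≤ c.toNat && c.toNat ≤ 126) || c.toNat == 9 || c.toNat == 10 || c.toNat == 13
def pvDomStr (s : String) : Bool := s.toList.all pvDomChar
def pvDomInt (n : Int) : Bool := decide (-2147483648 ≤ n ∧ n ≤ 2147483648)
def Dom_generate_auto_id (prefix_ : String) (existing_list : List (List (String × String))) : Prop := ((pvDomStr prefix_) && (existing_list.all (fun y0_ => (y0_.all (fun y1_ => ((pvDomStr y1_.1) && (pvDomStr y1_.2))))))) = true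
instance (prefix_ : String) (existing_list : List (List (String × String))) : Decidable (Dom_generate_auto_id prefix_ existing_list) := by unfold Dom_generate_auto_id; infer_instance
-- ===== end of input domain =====

-- B replaces A's unbounded candidate-string probe loop by one parse pass (canonical numeric
-- suffixes of the ids) followed by a mex scan over the sorted index set; same return value.

-- ===== PORT A =====
-- A's `while True` probe loop; the fuel argument only makes the recursion structural
-- (Python's loop always terminates; fuel `used.length + 1` is proved sufficient below).
def gaProbe (used : PySem.Set (List Char)) (base : List Char) : Nat → Nat → String
  | 0, _ => ""
  | fuel + 1, i =>
    let candidate := base ++ '_' :: PySem.Int.toChars (i : Int)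
    if PySem.Set.contains used candidate then gaProbe used base fuel (i + 1)
    else String.ofList candidate

def generate_auto_id (prefix_ : String) (existing_list : List (List (String × String))) : String :=
  let used : PySem.Set (List Char) := existing_list.foldl (fun used e =>
    match (PySem.Dict.mk e).get? "id" with
    | some v => PySem.Set.add used v.toList
    | none => used) PySem.Set.empty
  let base := PySem.Chars.replace prefix_.toList [' '] ['_']
  gaProbe used base (used.length + 1) 0

-- ===== PORT B =====
-- `n = 0; for c in rest: n = 10*n + (ord(c)-48)` of Source B
def gbVal (rest : List Char) : Int :=
  rest.foldl (fun n c => 10 * n + ((c.toNat : Int) - 48)) 0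

def gbTaken (tag : List Char) (existing_list : List (List (String × String))) : PySem.Set Int :=
  existing_list.foldl (fun taken e =>
    match (PySem.Dict.mk e).get? "id" with
    | some v =>
      let s := v.toList
      if PySem.Chars.startswith s tag then
        let rest := PySem.List.slice s (some (tag.length : Int)) none
        if PySem.Chars.strIsdigit rest && (rest == ['0'] || !(rest.head? == some '0')) then
          PySem.Set.add taken (gbVal rest)
        else taken
      else taken
    | none => taken) PySem.Set.empty

-- `i = 0; for n in sorted(taken): if n == i: i += 1` of Source B
def gbMex (taken : PySem.Set Int) : Int :=
  (PySem.List.sorted taken (fun x => x) false).foldl (fun i n => if n == i then i + 1 else i) 0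

def generate_auto_id_alt (prefix_ : String) (existing_list : List (List (String × String))) : String :=
  let base := PySem.Chars.replace prefix_.toList [' '] ['_']
  let taken := gbTaken (base ++ ['_']) existing_list
  String.ofList (base ++ '_' :: PySem.Int.toChars (gbMex taken))

-- ===== PRECONDITION & SPEC =====
def Spec_generate_auto_id (prefix_ : String) (existing_list : List (List (String × String))) (out : String) : Prop := out = generate_auto_id_alt prefix_ existing_list
instance (prefix_ : String) (existing_list : List (List (String × String))) (out : String) : Decidable (Spec_generate_auto_id prefix_ existing_list out) := by unfold Spec_generate_auto_id; infer_instance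

-- ===== CLAIM (what is proved, stated in full; the proofs are below) =====
def Claim_equal_generate_auto_id : Prop := ∀ (prefix_ : String) (existing_list : List (List (String × String))), Dom_generate_auto_id prefix_ existing_list → Spec_generate_auto_id prefix_ existing_list (generate_auto_id prefix_ existing_list)

-- ===== LEMMAS AND PROOFS =====

-- ---- generic foldl-into-set lemmas ----
def pvStep {β γ : Type} [BEq γ] (g : β → Option γ) (s : PySem.Set γ) (e : β) : PySem.Set γ :=
  match g e with
  | some v => PySem.Set.add s v
  | none => s

theorem pvNodupAdd {γ : Type} [BEq γ] [LawfulBEq γ] (s : PySem.Set γ) (x : γ)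
    (h : s.Nodup) : (PySem.Set.add s x).Nodup := by
  simp only [PySem.Set.add]
  split
  · exact h
  · rename_i hc
    rw [List.nodup_append]
    refine ⟨h, List.nodup_singleton x, ?_⟩
    intro a ha b hb
    simp only [List.mem_singleton] at hb
    subst hb
    intro hax
    subst hax
    exact hc ((PySem.Set.contains_iff s a).mpr ha)

theorem pvMemFoldlOpt {β γ : Type} [BEq γ] [LawfulBEq γ] (g : β → Option γ) :
    ∀ (l : List β) (s : PySem.Set γ) (x : γ),
      (x ∈ l.foldl (pvStep g) s) ↔ x ∈ s ∨ ∃ e ∈ l, g e = some x := by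
  intro l
  induction l with
  | nil => intro s x; simp
  | cons e l ih =>
    intro s x
    simp only [List.foldl_cons]
    cases hg : g e with
    | none => rw [ih]; simp [pvStep, hg]
    | some v =>
      rw [ih]
      simp only [pvStep, hg, PySem.Set.mem_add, List.mem_cons]
      constructor
      · rintro (⟨hs | rfl⟩ | h)
        · exact Or.inl hs
        · exact Or.inr ⟨e, Or.inl rfl, hg⟩
        · obtain ⟨e', he', hg'⟩ := h
          exact Or.inr ⟨e', Or.inr he', hg'⟩
      · rintro (hs | ⟨e', (rfl | he'), hg'⟩)
        · exact Or.inl (Or.inl hs)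
        · rw [hg] at hg'; exact Or.inl (Or.inr (Option.some.inj hg').symm)
        · exact Or.inr ⟨e', he', hg'⟩

theorem pvNodupFoldlOpt {β γ : Type} [BEq γ] [LawfulBEq γ] (g : β → Option γ) :
    ∀ (l : List β) (s : PySem.Set γ), s.Nodup → (l.foldl (pvStep g) s).Nodup := by
  intro l
  induction l with
  | nil => intro s h; exact h
  | cons e l ih =>
    intro s h
    simp only [List.foldl_cons]
    cases hg : g e with
    | none => refine ih _ ?_; simp [pvStep, hg]; exact h
    | some v => refine ih _ ?_; simp only [pvStep, hg]; exact pvNodupAdd s v h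

-- ---- the two loop bodies in the generic form ----
def gaG (e : List (String × String)) : Option (List Char) :=
  ((PySem.Dict.mk e).get? "id").map String.toList

def gbHit (tag : List Char) (s : List Char) : Option Int :=
  if PySem.Chars.startswith s tag then
    let rest := PySem.List.slice s (some (tag.length : Int)) none
    if PySem.Chars.strIsdigit rest && (rest == ['0'] || !(rest.head? == some '0')) then
      some (gbVal rest)
    else none
  else none

def gbG (tag : List Char) (e : List (String × String)) : Option Int :=
  ((PySem.Dict.mk e).get? "id").bind (fun v => gbHit tag v.toList)

theorem pvUsedBody_eq :
    (fun (used : PySem.Set (List Char)) (e : List (String × String)) =>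
      match (PySem.Dict.mk e).get? "id" with
      | some v => PySem.Set.add used v.toList
      | none => used) = pvStep gaG := by
  funext s e
  unfold pvStep gaG
  cases (PySem.Dict.mk e).get? "id" <;> rfl

theorem pvTakenBody_eq (tag : List Char) :
    (fun (taken : PySem.Set Int) (e : List (String × String)) =>
      match (PySem.Dict.mk e).get? "id" with
      | some v =>
        let s := v.toList
        if PySem.Chars.startswith s tag then
          let rest := PySem.List.slice s (some (tag.length : Int)) none
          if PySem.Chars.strIsdigit rest && (rest == ['0'] || !(rest.head? == some '0')) then
            PySem.Set.add taken (gbVal rest)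
          else taken
        else taken
      | none => taken) = pvStep (gbG tag) := by
  funext s e
  unfold pvStep gbG gbHit
  cases (PySem.Dict.mk e).get? "id" with
  | none => rfl
  | some v =>
    simp only [Option.bind_some]
    split
    · split <;> rfl
    · rfl

theorem pvTaken_eq (tag : List Char) (l : List (List (String × String))) :
    gbTaken tag l = l.foldl (pvStep (gbG tag)) PySem.Set.empty := by
  unfold gbTaken
  rw [pvTakenBody_eq]

-- ---- decimal-string characterisation of str(n) ----
def pvCanon (m : Nat) : List Char :=
  if m = 0 then ['0'] else ((Nat.digits 10 m).map Nat.digitChar).reverse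

theorem pvTdc : ∀ (f n : Nat) (l : List Char), 0 < n → n < f →
    Nat.toDigitsCore 10 f n l = ((Nat.digits 10 n).map Nat.digitChar).reverse ++ l := by
  intro f
  induction f with
  | zero => intro n l h1 h2; omega
  | succ f ih =>
    intro n l hn hf
    rw [Nat.toDigitsCore]
    by_cases h10 : n / 10 = 0
    · rw [if_pos h10]
      have hlt : n < 10 := by omega
      rw [Nat.digits_def' (by norm_num : (1:ℕ) < 10) hn, h10]
      simp [Nat.mod_eq_of_lt hlt]
    · rw [if_neg h10]
      have hq : 0 < n / 10 := Nat.pos_of_ne_zero h10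
      have hqf : n / 10 < f := by
        have := Nat.div_lt_self hn (by norm_num : 1 < 10)
        omega
      rw [ih (n / 10) _ hq hqf]
      rw [Nat.digits_def' (by norm_num : (1:ℕ) < 10) hn]
      simp [List.append_assoc]

theorem pvToChars_nat (m : Nat) : PySem.Int.toChars ((m : Nat) : Int) = pvCanon m := by
  by_cases hm : m = 0
  · subst hm; rfl
  · unfold PySem.Int.toChars pvCanon
    rw [if_neg (by omega), if_neg hm]
    rw [Int.toNat_natCast]
    unfold Nat.toDigits
    rw [pvTdc (m + 1) m [] (Nat.pos_of_ne_zero hm) (by omega)]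
    simp

theorem pvIsdigit_digitChar (d : Nat) (h : d < 10) :
    PySem.Chars.isdigit (Nat.digitChar d) = true := by
  interval_cases d <;> decide

theorem pvToNat_digitChar (d : Nat) (h : d < 10) : (Nat.digitChar d).toNat = 48 + d := by
  interval_cases d <;> decide

theorem pvDigitChar_ne_zero (d : Nat) (h : d < 10) (hd : d ≠ 0) : Nat.digitChar d ≠ '0' := by
  interval_cases d <;> revert hd <;> decide

theorem pvChar_toNat_inj (a b : Char) (h : a.toNat = b.toNat) : a = b :=
  Char.ext (UInt32.toNat_inj.mp h)

theorem pvDigitChar_of_isdigit (c : Char) (h : PySem.Chars.isdigit c = true) :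
    c.toNat - 48 < 10 ∧ Nat.digitChar (c.toNat - 48) = c := by
  simp only [PySem.Chars.isdigit, Bool.and_eq_true, decide_eq_true_eq] at h
  obtain ⟨h1, h2⟩ := h
  rw [Char.le_def, UInt32.le_iff_toNat_le] at h1 h2
  have hl : 48 ≤ c.toNat := h1
  have hu : c.toNat ≤ 57 := h2
  have hd : c.toNat - 48 < 10 := by omega
  refine ⟨hd, ?_⟩
  apply pvChar_toNat_inj
  rw [pvToNat_digitChar _ hd]
  omega

theorem pvValFold : ∀ (ds : List Nat), (∀ d ∈ ds, d < 10) → ∀ a : Int,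
    ((ds.map Nat.digitChar).reverse).foldl (fun n c => 10 * n + ((c.toNat : Int) - 48)) a
      = a * 10 ^ ds.length + ((Nat.ofDigits 10 ds : Nat) : Int) := by
  intro ds
  induction ds with
  | nil => intro _ a; simp
  | cons d ds ih =>
    intro hd a
    simp only [List.map_cons, List.reverse_cons, List.foldl_append, List.foldl_cons,
      List.foldl_nil]
    rw [ih (fun x hx => hd x (List.mem_cons_of_mem d hx)) a]
    rw [pvToNat_digitChar d (hd d List.mem_cons_self)]
    rw [Nat.ofDigits_cons, List.length_cons, pow_succ]
    push_cast
    ring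

theorem pvVal_canon (m : Nat) : gbVal (pvCanon m) = (m : Int) := by
  by_cases hm : m = 0
  · subst hm; rfl
  · unfold pvCanon gbVal
    rw [if_neg hm]
    rw [pvValFold _ (fun d hd => Nat.digits_lt_base (by norm_num) hd) 0]
    simp [Nat.ofDigits_digits]

theorem pvIsdigit_canon (m : Nat) : PySem.Chars.strIsdigit (pvCanon m) = true := by
  by_cases hm : m = 0
  · subst hm; decide
  · unfold pvCanon PySem.Chars.strIsdigit
    rw [if_neg hm]
    have hne : Nat.digits 10 m ≠ [] := Nat.digits_ne_nil_iff_ne_zero.mpr hm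
    rw [Bool.and_eq_true]
    constructor
    · simp [hne]
    · rw [List.all_eq_true]
      intro c hc
      rw [List.mem_reverse, List.mem_map] at hc
      obtain ⟨d, hd, rfl⟩ := hc
      exact pvIsdigit_digitChar d (Nat.digits_lt_base (by norm_num) hd)

theorem pvHeadCond_canon (m : Nat) :
    (pvCanon m == ['0'] || !(List.head? (pvCanon m) == some '0')) = true := by
  by_cases hm : m = 0
  · subst hm; decide
  · rw [Bool.or_eq_true]
    right
    unfold pvCanon
    rw [if_neg hm]
    have hne : Nat.digits 10 m ≠ [] := Nat.digits_ne_nil_iff_ne_zero.mpr hm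
    rw [List.head?_reverse, List.getLast?_map]
    rw [List.getLast?_eq_some_getLast hne]
    have hlast := Nat.getLast_digit_ne_zero 10 hm
    have hltb : (Nat.digits 10 m).getLast hne < 10 :=
      Nat.digits_lt_base (by norm_num) (List.getLast_mem hne)
    simp only [Option.map_some, Bool.not_eq_eq_eq_not, Bool.not_true, beq_eq_false_iff_ne,
      ne_eq, Option.some.injEq]
    exact pvDigitChar_ne_zero _ hltb hlast

theorem pvCanonOfCond (rest : List Char)
    (h1 : PySem.Chars.strIsdigit rest = true)
    (h2 : (rest == ['0'] || !(rest.head? == some '0')) = true) :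
    0 ≤ gbVal rest ∧ PySem.Int.toChars (gbVal rest) = rest := by
  have hdig : ∀ c ∈ rest, PySem.Chars.isdigit c = true := by
    unfold PySem.Chars.strIsdigit at h1
    rw [Bool.and_eq_true, List.all_eq_true] at h1
    exact h1.2
  have hne : rest ≠ [] := by
    unfold PySem.Chars.strIsdigit at h1
    rw [Bool.and_eq_true] at h1
    simpa using h1.1
  set ds : List Nat := rest.reverse.map (fun c => c.toNat - 48) with hds
  have hds10 : ∀ d ∈ ds, d < 10 := by
    intro d hd
    rw [hds, List.mem_map] at hd
    obtain ⟨c, hc, rfl⟩ := hd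
    exact (pvDigitChar_of_isdigit c (hdig c (List.mem_reverse.mp hc))).1
  have hrest : (ds.map Nat.digitChar).reverse = rest := by
    rw [hds, List.map_map]
    have hmapid : rest.reverse.map (Nat.digitChar ∘ fun c => c.toNat - 48) =
        rest.reverse.map id := by
      apply List.map_congr_left
      intro c hc
      exact (pvDigitChar_of_isdigit c (hdig c (List.mem_reverse.mp hc))).2
    rw [hmapid, List.map_id, List.reverse_reverse]
  have hval : gbVal rest = ((Nat.ofDigits 10 ds : Nat) : Int) := by
    unfold gbVal
    rw [← hrest, pvValFold ds hds10 0]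
    simp
  refine ⟨by rw [hval]; exact Int.natCast_nonneg _, ?_⟩
  rw [hval]
  rw [pvToChars_nat]
  rw [Bool.or_eq_true] at h2
  cases h2 with
  | inl h0 =>
    have hr0 : rest = ['0'] := by simpa using h0
    subst hr0
    rw [hds]
    rfl
  | inr hhead =>
    have hhead' : rest.head? ≠ some '0' := by simpa using hhead
    have hdsne : ds ≠ [] := by
      rw [hds]
      simp [hne]
    have hlast : ∀ (h : ds ≠ []), ds.getLast h ≠ 0 := by
      intro h
      cases hrh : rest.head? with
      | none => exact absurd (List.head?_eq_none_iff.mp hrh) hne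
      | some c0 =>
        have hc0mem : c0 ∈ rest := List.mem_of_mem_head? (Option.mem_def.mpr hrh)
        have hgl : ds.getLast? = some (c0.toNat - 48) := by
          rw [hds, List.getLast?_map, List.getLast?_reverse, hrh]
          rfl
        have heq : ds.getLast h = c0.toNat - 48 := by
          rw [List.getLast?_eq_some_getLast h] at hgl
          exact Option.some.inj hgl
        intro h0
        have hc0d := pvDigitChar_of_isdigit c0 (hdig c0 hc0mem)
        have hz : c0.toNat - 48 = 0 := by rw [← heq]; exact h0
        have hc00 : c0 = '0' := by rw [← hc0d.2, hz]; decide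
        exact hhead' (by rw [hrh, hc00])
    have hdm : Nat.digits 10 (Nat.ofDigits 10 ds) = ds :=
      Nat.digits_ofDigits 10 (by norm_num) ds hds10 hlast
    have hm0 : Nat.ofDigits 10 ds ≠ 0 := by
      intro h0
      apply hdsne
      rw [← hdm, h0]
      simp
    unfold pvCanon
    rw [if_neg hm0, hdm, hrest]

-- ---- gbHit against the candidate strings ----
theorem pvTagCons (base : List Char) (X : List Char) :
    (base ++ ['_']) ++ X = base ++ '_' :: X := by simp

theorem pvGbHit_of_eq (tag : List Char) (m : Nat) :
    gbHit tag (tag ++ PySem.Int.toChars ((m : Nat) : Int)) = some ((m : Nat) : Int) := by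
  unfold gbHit
  have hsw : PySem.Chars.startswith (tag ++ PySem.Int.toChars ((m : Nat) : Int)) tag = true :=
    (PySem.Chars.startswith_iff _ _).mpr ⟨_, rfl⟩
  rw [if_pos hsw]
  have hsl : PySem.List.slice (tag ++ PySem.Int.toChars ((m : Nat) : Int))
      (some (tag.length : Int)) none = PySem.Int.toChars ((m : Nat) : Int) := by
    rw [PySem.List.slice_from _ (by omega : (0:Int) ≤ (tag.length : Int))]
    rw [Int.toNat_natCast]
    exact List.drop_left
  rw [hsl, pvToChars_nat]
  rw [if_pos (by rw [Bool.and_eq_true]; exact ⟨pvIsdigit_canon m, pvHeadCond_canon m⟩)]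
  rw [pvVal_canon]

theorem pvGbHit_eq_some (tag s : List Char) (n : Int) (h : gbHit tag s = some n) :
    0 ≤ n ∧ s = tag ++ PySem.Int.toChars n := by
  unfold gbHit at h
  by_cases hsw : PySem.Chars.startswith s tag = true
  · rw [if_pos hsw] at h
    obtain ⟨rest0, hs⟩ := (PySem.Chars.startswith_iff s tag).mp hsw
    have hsl : PySem.List.slice s (some (tag.length : Int)) none = rest0 := by
      rw [PySem.List.slice_from _ (by omega : (0:Int) ≤ (tag.length : Int))]
      rw [Int.toNat_natCast, ← hs]
      exact List.drop_left
    rw [hsl] at h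
    by_cases hc : (PySem.Chars.strIsdigit rest0 &&
        (rest0 == ['0'] || !(rest0.head? == some '0'))) = true
    · rw [if_pos hc] at h
      rw [Bool.and_eq_true] at hc
      obtain ⟨hval0, hcanon⟩ := pvCanonOfCond rest0 hc.1 hc.2
      have hn : gbVal rest0 = n := Option.some.inj h
      subst hn
      exact ⟨hval0, by rw [hcanon]; exact hs.symm⟩
    · rw [if_neg hc] at h
      exact absurd h (by simp)
  · rw [if_neg hsw] at h
    exact absurd h (by simp)

-- ---- membership characterisations of the two accumulated sets ----
theorem pvMemUsed (l : List (List (String × String))) (x : List Char) :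
    (x ∈ l.foldl (pvStep gaG) PySem.Set.empty) ↔ ∃ e ∈ l, gaG e = some x := by
  rw [pvMemFoldlOpt]
  simp [PySem.Set.empty]

theorem pvMemTaken (tag : List Char) (l : List (List (String × String))) (n : Int) :
    (n ∈ gbTaken tag l) ↔ ∃ e ∈ l, gbG tag e = some n := by
  rw [pvTaken_eq, pvMemFoldlOpt]
  simp [PySem.Set.empty]

theorem pvMem_iff (tag : List Char) (l : List (List (String × String))) (m : Nat) :
    ((tag ++ PySem.Int.toChars ((m : Nat) : Int)) ∈ l.foldl (pvStep gaG) PySem.Set.empty) ↔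
      ((m : Nat) : Int) ∈ gbTaken tag l := by
  rw [pvMemUsed, pvMemTaken]
  constructor
  · rintro ⟨e, he, hg⟩
    refine ⟨e, he, ?_⟩
    unfold gaG at hg
    unfold gbG
    cases hv : (PySem.Dict.mk e).get? "id" with
    | none => rw [hv] at hg; exact absurd hg (by simp)
    | some v =>
      rw [hv] at hg
      have hvl : v.toList = tag ++ PySem.Int.toChars ((m : Nat) : Int) := by
        simpa using hg
      show gbHit tag v.toList = some ((m : Nat) : Int)
      rw [hvl]
      exact pvGbHit_of_eq tag m
  · rintro ⟨e, he, hg⟩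
    refine ⟨e, he, ?_⟩
    unfold gbG at hg
    unfold gaG
    cases hv : (PySem.Dict.mk e).get? "id" with
    | none => rw [hv] at hg; exact absurd hg (by simp)
    | some v =>
      rw [hv] at hg
      have hhit : gbHit tag v.toList = some ((m : Nat) : Int) := hg
      have hvl := (pvGbHit_eq_some tag v.toList _ hhit).2
      simp [hvl]

-- ---- mex of a sorted duplicate-free list ----
theorem pvMexInv : ∀ (L : List Int), L.Pairwise (· < ·) → ∀ a : Int, (∀ x ∈ L, a ≤ x) →
    (a ≤ L.foldl (fun i n => if n == i then i + 1 else i) a ∧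
     L.foldl (fun i n => if n == i then i + 1 else i) a ∉ L ∧
     (∀ j : Int, a ≤ j → j < L.foldl (fun i n => if n == i then i + 1 else i) a → j ∈ L) ∧
     L.foldl (fun i n => if n == i then i + 1 else i) a ≤ a + L.length) := by
  intro L
  induction L with
  | nil => intro _ a _; simp
  | cons x L ih =>
    intro hpw a hge
    have hxL : ∀ y ∈ L, x < y := (List.pairwise_cons.mp hpw).1
    have hpw' : L.Pairwise (· < ·) := (List.pairwise_cons.mp hpw).2
    simp only [List.foldl_cons]
    by_cases hx : x = a
    · subst hx
      rw [if_pos (by simp)]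
      obtain ⟨h1, h2, h3, h4⟩ := ih hpw' (x + 1) (fun y hy => by have := hxL y hy; omega)
      refine ⟨by omega, ?_, ?_, ?_⟩
      · intro hmem
        rcases List.mem_cons.mp hmem with hhd | htl
        · omega
        · exact h2 htl
      · intro j hj1 hj2
        by_cases hjx : j = x
        · subst hjx; exact List.mem_cons_self
        · exact List.mem_cons_of_mem _ (h3 j (by omega) hj2)
      · simp only [List.length_cons]
        omega
    · have hax : a < x := lt_of_le_of_ne (hge x List.mem_cons_self) (fun h => hx h.symm)
      rw [if_neg (by simp; omega)]
      obtain ⟨h1, h2, h3, h4⟩ := ih hpw' a (fun y hy => by have := hxL y hy; omega)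
      set M := L.foldl (fun i n => if n == i then i + 1 else i) a with hM
      have hMx : M ≤ x := by
        by_contra hgt
        have hxm := h3 x (by omega) (by omega)
        have := hxL x hxm
        omega
      have hMne : M ≠ x := by
        intro hMeq
        have haM : a < M := by omega
        have ham := h3 a (le_refl a) (by omega)
        have := hxL a ham
        omega
      refine ⟨h1, ?_, ?_, ?_⟩
      · intro hmem
        rcases List.mem_cons.mp hmem with hhd | htl
        · exact hMne hhd
        · exact h2 htl
      · intro j hj1 hj2
        exact List.mem_cons_of_mem _ (h3 j hj1 hj2)
      · simp only [List.length_cons]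
        omega

-- ---- A's probe loop finds the first free index ----
theorem pvProbe (used : PySem.Set (List Char)) (base : List Char) (N : Nat)
    (hmem : ∀ j : Nat, j < N → (base ++ '_' :: PySem.Int.toChars ((j : Nat) : Int)) ∈ used)
    (hfree : (base ++ '_' :: PySem.Int.toChars ((N : Nat) : Int)) ∉ used) :
    ∀ (fuel i : Nat), i ≤ N → N - i < fuel →
      gaProbe used base fuel i = String.ofList (base ++ '_' :: PySem.Int.toChars ((N : Nat) : Int)) := by
  intro fuel
  induction fuel with
  | zero => intro i h1 h2; omega
  | succ fuel ih =>
    intro i hiN hfuel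
    unfold gaProbe
    show (if PySem.Set.contains used (base ++ '_' :: PySem.Int.toChars ((i : Nat) : Int)) = true
        then gaProbe used base fuel (i + 1)
        else String.ofList (base ++ '_' :: PySem.Int.toChars ((i : Nat) : Int))) = _
    by_cases hi : i = N
    · subst hi
      have hc : PySem.Set.contains used (base ++ '_' :: PySem.Int.toChars ((i : Nat) : Int)) = false := by
        rw [← Bool.not_eq_true]
        intro hc
        exact hfree ((PySem.Set.contains_iff _ _).mp hc)
      rw [hc]
      simp
    · have hilt : i < N := by omega
      have hc : PySem.Set.contains used (base ++ '_' :: PySem.Int.toChars ((i : Nat) : Int)) = true :=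
        (PySem.Set.contains_iff _ _).mpr (hmem i hilt)
      rw [hc]
      simp only [if_true]
      exact ih (i + 1) (by omega) (by omega)

theorem pvToChars_inj (n n' : Int) (h0 : 0 ≤ n) (h0' : 0 ≤ n')
    (h : PySem.Int.toChars n = PySem.Int.toChars n') : n = n' := by
  rw [← Int.toNat_of_nonneg h0, ← Int.toNat_of_nonneg h0'] at h ⊢
  rw [pvToChars_nat, pvToChars_nat] at h
  rw [← pvVal_canon n.toNat, ← pvVal_canon n'.toNat, h]

theorem pvMexSpec (T : PySem.Set Int) (hnd : T.Nodup) (hpos : ∀ x ∈ T, 0 ≤ x) :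
    0 ≤ gbMex T ∧ gbMex T ∉ T ∧ (∀ j : Int, 0 ≤ j → j < gbMex T → j ∈ T) ∧
      (gbMex T : Int) ≤ T.length := by
  unfold gbMex
  have hSnd : (PySem.List.sorted T (fun x => x) false).Nodup :=
    ((PySem.List.sorted_perm T (fun x => x) false).nodup_iff).mpr hnd
  have hSpw : (PySem.List.sorted T (fun x => x) false).Pairwise (· < ·) :=
    ((PySem.List.sorted_pairwise T (fun x => x)).and hSnd).imp
      (fun h => lt_of_le_of_ne h.1 h.2)
  have hS0 : ∀ x ∈ PySem.List.sorted T (fun x => x) false, (0 : Int) ≤ x := by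
    intro x hx
    exact hpos x ((PySem.List.mem_sorted T (fun x => x) false x).mp hx)
  obtain ⟨h1, h2, h3, h4⟩ := pvMexInv (PySem.List.sorted T (fun x => x) false) hSpw 0 hS0
  refine ⟨h1, ?_, ?_, ?_⟩
  · intro hmem
    exact h2 ((PySem.List.mem_sorted T (fun x => x) false _).mpr hmem)
  · intro j hj1 hj2
    exact (PySem.List.mem_sorted T (fun x => x) false j).mp (h3 j hj1 hj2)
  · have := PySem.List.length_sorted T (fun x => x) false
    omega

-- ===== VERDICT (by name: the statement is the Claim_ definition above) =====
theorem generate_auto_id_spec : Claim_equal_generate_auto_id := by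
  intro prefix_ existing_list _
  unfold Spec_generate_auto_id
  dsimp only [generate_auto_id, generate_auto_id_alt]
  rw [pvUsedBody_eq]
  generalize PySem.Chars.replace prefix_.toList [' '] ['_'] = base
  have hnodT : (gbTaken (base ++ ['_']) existing_list).Nodup := by
    rw [pvTaken_eq]
    exact pvNodupFoldlOpt (gbG (base ++ ['_'])) existing_list PySem.Set.empty List.nodup_nil
  have hposT : ∀ n ∈ gbTaken (base ++ ['_']) existing_list, (0 : Int) ≤ n := by
    intro n hn
    obtain ⟨e, he, hg⟩ := (pvMemTaken (base ++ ['_']) existing_list n).mp hn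
    unfold gbG at hg
    cases hv : (PySem.Dict.mk e).get? "id" with
    | none => rw [hv] at hg; exact absurd hg (by simp)
    | some v =>
      rw [hv] at hg
      exact (pvGbHit_eq_some _ _ _ hg).1
  have hsubT : ∀ n ∈ gbTaken (base ++ ['_']) existing_list,
      ((base ++ ['_']) ++ PySem.Int.toChars n) ∈
        existing_list.foldl (pvStep gaG) PySem.Set.empty := by
    intro n hn
    obtain ⟨e, he, hg⟩ := (pvMemTaken (base ++ ['_']) existing_list n).mp hn
    unfold gbG at hg
    cases hv : (PySem.Dict.mk e).get? "id" with
    | none => rw [hv] at hg; exact absurd hg (by simp)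
    | some v =>
      rw [hv] at hg
      have hvl := (pvGbHit_eq_some _ _ _ hg).2
      rw [pvMemUsed]
      exact ⟨e, he, by unfold gaG; rw [hv]; simp [hvl]⟩
  obtain ⟨hM0, hMnotin, hMall, hMlen⟩ :=
    pvMexSpec (gbTaken (base ++ ['_']) existing_list) hnodT hposT
  have hTU : (gbTaken (base ++ ['_']) existing_list).length ≤
      (existing_list.foldl (pvStep gaG) PySem.Set.empty).length := by
    have hmapnd : ((gbTaken (base ++ ['_']) existing_list).map
        (fun n => (base ++ ['_']) ++ PySem.Int.toChars n)).Nodup := by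
      apply List.Nodup.map_on _ hnodT
      intro x hx y hy hxy
      exact pvToChars_inj x y (hposT x hx) (hposT y hy) (List.append_cancel_left hxy)
    have hmapsub : ((gbTaken (base ++ ['_']) existing_list).map
        (fun n => (base ++ ['_']) ++ PySem.Int.toChars n)) ⊆
          existing_list.foldl (pvStep gaG) PySem.Set.empty := by
      intro x hx
      rw [List.mem_map] at hx
      obtain ⟨n, hn, rfl⟩ := hx
      exact hsubT n hn
    have hle := (List.subperm_of_subset hmapnd hmapsub).length_le
    rw [List.length_map] at hle
    exact hle
  have hMN : (((gbMex (gbTaken (base ++ ['_']) existing_list)).toNat : Nat) : Int) =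
      gbMex (gbTaken (base ++ ['_']) existing_list) := Int.toNat_of_nonneg hM0
  have hmem : ∀ j : Nat, j < (gbMex (gbTaken (base ++ ['_']) existing_list)).toNat →
      (base ++ '_' :: PySem.Int.toChars ((j : Nat) : Int)) ∈
        existing_list.foldl (pvStep gaG) PySem.Set.empty := by
    intro j hj
    rw [← pvTagCons]
    exact (pvMem_iff (base ++ ['_']) existing_list j).mpr
      (hMall (j : Int) (by omega) (by omega))
  have hfree : (base ++ '_' :: PySem.Int.toChars
      (((gbMex (gbTaken (base ++ ['_']) existing_list)).toNat : Nat) : Int)) ∉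
        existing_list.foldl (pvStep gaG) PySem.Set.empty := by
    intro hmem'
    rw [← pvTagCons] at hmem'
    have hT := (pvMem_iff (base ++ ['_']) existing_list _).mp hmem'
    rw [hMN] at hT
    exact hMnotin hT
  rw [pvProbe _ base (gbMex (gbTaken (base ++ ['_']) existing_list)).toNat hmem hfree _ 0
    (by omega)
    (by
      have hml : (gbMex (gbTaken (base ++ ['_']) existing_list) : Int) ≤
          ((existing_list.foldl (pvStep gaG) PySem.Set.empty).length : Int) :=
        le_trans hMlen (by exact_mod_cast hTU)
      omega)]
  rw [hMN]
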